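-- pv_equiv track=rewrite | github.com/cutehammond772/problem-solving-archive | 백준/Platinum/2568. 전깃줄 － 2/전깃줄 － 2.py | solve
-- ===== SOURCE A (Python) =====
-- def lower_bound(A, K):
--   x, y = 0, len(A)
--
--   while x < y:
--     mid = (x + y) // 2
--
--     if A[mid] >= K:
--       y = mid
--     else:
--       x = mid + 1
--
--   return x
--
-- def solve(N, P):
--   memo, indexes = [P[0][1]], [0]
--   result = { P[x][0] for x in range(N) }
--
--   for x in range(1, N):
--     if memo[-1] < P[x][1]:
--       indexes.append(len(memo))
--       memo.append(P[x][1])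
--       continue
--
--     idx = lower_bound(memo, P[x][1])
--
--     memo[idx] = P[x][1]
--     indexes.append(idx)
--
--   offset = len(memo) - 1
--
--   for x in range(N - 1, -1, -1):
--     if offset < 0:
--       break
--
--     if indexes[x] == offset:
--       result.remove(P[x][0])
--       offset -= 1
--
--   return N - len(memo), list(sorted(result))
-- ===== SOURCE B (Python) =====
-- def solve(N, P):
--     # Quadratic LIS DP over the wire heights: the first wire's increasing run has
--     # length 1, each later wire extends the best strictly-lower run before it.
--     lengths = [1]
--     for x in range(1, N):
--         best = 0
--         for j in range(x):
--             if P[j][1] < P[x][1] and lengths[j] > best: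
--                 best = lengths[j]
--         lengths.append(best + 1)
--     L = max(lengths)
--     kept = set()
--     offset = L - 1
--     for x in range(N - 1, -1, -1):
--         if offset >= 0 and lengths[x] - 1 == offset:
--             kept.add(P[x][0])
--             offset -= 1
--     return N - L, sorted(P[x][0] for x in range(N) if P[x][0] not in kept)
-- ===== Notes on version B (the rewrite author's own statement) =====
-- stated objective: simpler
-- what changed: Replaces the patience-sorting LIS (memo piles + hand-written binary search) by the classic quadratic LIS DP over the wire heights and collects the kept wires directly instead of deleting from a set of all wires; the lower_bound helper disappears. Pre_ excludes empty P (A raises IndexError reading P[0]), N > len(P) (A raises IndexError) and duplicate first coordinates among the first N wires (A's set of firsts collapses duplicates and result.remove can raise KeyError).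
-- outside the precondition, e.g. on solve(3, [(3, 77), (3, 5), (10, 2), (5, 1)]): A returns (2, [3]), B returns (2, [3, 3]); on solve(2, [(1, 2), (1, 1)]): A returns (1, []), B returns (1, [])
import Mathlib
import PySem

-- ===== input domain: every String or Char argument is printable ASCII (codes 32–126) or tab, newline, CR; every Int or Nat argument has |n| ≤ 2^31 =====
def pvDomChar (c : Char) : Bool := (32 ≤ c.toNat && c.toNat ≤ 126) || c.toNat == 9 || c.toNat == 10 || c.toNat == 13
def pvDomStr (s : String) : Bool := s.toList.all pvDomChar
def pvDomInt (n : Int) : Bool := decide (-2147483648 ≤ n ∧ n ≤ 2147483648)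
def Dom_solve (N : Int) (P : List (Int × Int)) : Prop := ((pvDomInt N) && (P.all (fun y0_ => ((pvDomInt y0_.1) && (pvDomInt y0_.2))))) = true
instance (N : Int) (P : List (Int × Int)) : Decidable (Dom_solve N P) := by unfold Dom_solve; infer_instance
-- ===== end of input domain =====

-- B replaces A's patience-sorting LIS (piles + hand-written binary search) by the classic
-- quadratic LIS DP and collects the kept wires directly instead of deleting from a set of all
-- wires; same return value on Pre_ (nonempty P, N ≤ len(P), distinct first coordinates).


-- ===== PORT A =====

-- while x < y: mid = (x+y)//2; if A[mid] >= K: y = mid else: x = mid+1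
def lowerBoundGo (A : List Int) (K : Int) (x y : Int) : Int :=
  if _hxy : x < y then
    let mid := PySem.Int.floordiv (x + y) 2
    match PySem.List.pyGet? A mid with
    | some v => if v ≥ K then lowerBoundGo A K x mid else lowerBoundGo A K (mid + 1) y
    | none => x   -- IndexError in Python; unreachable: callers keep 0 ≤ x, y ≤ len A
  else x
termination_by (y - x).toNat
decreasing_by
  · have h1 := PySem.Int.floordiv_mul_add_mod (x + y) 2
    have h2 := PySem.Int.mod_nonneg (x + y) (by omega : (0:Int) < 2)
    have h3 := PySem.Int.mod_lt (x + y) (by omega : (0:Int) < 2)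
    omega
  · have h1 := PySem.Int.floordiv_mul_add_mod (x + y) 2
    have h2 := PySem.Int.mod_nonneg (x + y) (by omega : (0:Int) < 2)
    have h3 := PySem.Int.mod_lt (x + y) (by omega : (0:Int) < 2)
    omega

def lower_bound (A : List Int) (K : Int) : Int := lowerBoundGo A K 0 (A.length : Int)

-- body of A's main loop, on P[x][1] (memo, indexes as the state)
def stepA (st : List Int × List Int) (v : Int) : List Int × List Int :=
  if PySem.List.pyGetD st.1 (-1) 0 < v then
    (st.1 ++ [v], st.2 ++ [(st.1.length : Int)])
  else
    let idx := lower_bound st.1 v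
    (PySem.List.pySetD st.1 idx v, st.2 ++ [idx])

-- body of A's reconstruction loop ('break' once offset < 0 = skip the rest)
def stepRA (idxs : List Int) (P : List (Int × Int)) (st : PySem.Set Int × Int) (x : Int) :
    PySem.Set Int × Int :=
  if st.2 < 0 then st
  else if PySem.List.pyGetD idxs x 0 = st.2 then
    -- result.remove(P[x][0]): KeyError impossible under Pre_ (distinct first coordinates)
    (((PySem.Set.remove? st.1 ((PySem.List.pyGetD P x (0, 0)).1)).getD st.1), st.2 - 1)
  else st

def solve (N : Int) (P : List (Int × Int)) : Int × List Int :=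
  match PySem.List.pyGet? P 0 with
  | none => (0, [])   -- P[0] raises IndexError in Python; excluded by Pre_
  | some p0 =>
    -- pyGetD below: index always in range under Pre_ (N ≤ len P)
    let result0 : PySem.Set Int :=
      PySem.Set.ofList ((PySem.List.pyRange 0 N 1).map (fun x => (PySem.List.pyGetD P x (0, 0)).1))
    let st := (PySem.List.pyRange 1 N 1).foldl
      (fun st x => stepA st ((PySem.List.pyGetD P x (0, 0)).2)) ([p0.2], [0])
    let fin := (PySem.List.pyRange (N - 1) (-1) (-1)).foldl (stepRA st.2 P)
      (result0, (st.1.length : Int) - 1)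
    (N - (st.1.length : Int), PySem.List.sorted fin.1 (fun a => a) false)

-- ===== PORT B =====

-- inner loop: best = max over j in range(x) of lengths[j] with P[j][1] < P[x][1] (default 0)
def innerB (P : List (Int × Int)) (ls : List Int) (x : Int) : Int :=
  (PySem.List.pyRange 0 x 1).foldl
    (fun b j =>
      if (PySem.List.pyGetD P j (0, 0)).2 < (PySem.List.pyGetD P x (0, 0)).2 ∧
          b < PySem.List.pyGetD ls j 0
      then PySem.List.pyGetD ls j 0 else b) 0

-- body of B's DP loop: lengths.append(best + 1)
def stepAltB (P : List (Int × Int)) (ls : List Int) (x : Int) : List Int :=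
  ls ++ [innerB P ls x + 1]

-- body of B's kept-wire loop
def stepRB (lens : List Int) (P : List (Int × Int)) (st : PySem.Set Int × Int) (x : Int) :
    PySem.Set Int × Int :=
  if st.2 ≥ 0 ∧ PySem.List.pyGetD lens x 0 - 1 = st.2 then
    (PySem.Set.add st.1 ((PySem.List.pyGetD P x (0, 0)).1), st.2 - 1)
  else st

def solve_alt (N : Int) (P : List (Int × Int)) : Int × List Int :=
  let lengths := (PySem.List.pyRange 1 N 1).foldl (stepAltB P) [1]
  match PySem.List.max? lengths (fun l => l) with
  | none => (0, [])   -- unreachable: lengths always contains the seed 1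
  | some L =>
    let fin := (PySem.List.pyRange (N - 1) (-1) (-1)).foldl (stepRB lengths P)
      (PySem.Set.empty, L - 1)
    (N - L,
     PySem.List.sorted
       (((PySem.List.pyRange 0 N 1).map (fun x => (PySem.List.pyGetD P x (0, 0)).1)).filter
         (fun a => !(PySem.Set.contains fin.1 a)))
       (fun a => a) false)

-- ===== PRECONDITION & SPEC =====
-- Pre_ excludes empty P (A raises IndexError reading P[0]), N > len(P) (A raises IndexError),
-- and duplicate first coordinates among the first N wires (A's set of firsts collapses
-- duplicates and result.remove can raise KeyError).
def Pre_solve (N : Int) (P : List (Int × Int)) : Prop :=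
  P ≠ [] ∧ N ≤ (P.length : Int) ∧ ((P.take N.toNat).map (fun p => p.1)).Nodup
instance (N : Int) (P : List (Int × Int)) : Decidable (Pre_solve N P) := by
  unfold Pre_solve; infer_instance

def pvWitness_solve : Int × (List (Int × Int)) := (3, [(2, 2), (1, 1), (3, 3)])

def Spec_solve (N : Int) (P : List (Int × Int)) (out : Int × List Int) : Prop := out = solve_alt N P
instance (N : Int) (P : List (Int × Int)) (out : Int × List Int) : Decidable (Spec_solve N P out) := by
  unfold Spec_solve; infer_instance

-- ===== CLAIM (what is proved, stated in full; the proofs are below) =====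
def Claim_equal_solve : Prop :=
  ∀ (N : Int) (P : List (Int × Int)), Dom_solve N P → Pre_solve N P → Spec_solve N P (solve N P)

-- ===== LEMMAS AND PROOFS =====

-- proof-side reformulation of B's DP body as a fold over zip(heights, lengths)
def stepB (hs : List Int) (ls : List Int) (h : Int) : List Int :=
  let best := (hs.zip ls).foldl (fun b gl => if gl.1 < h ∧ b < gl.2 then gl.2 else b) 0
  ls ++ [best + 1]

-- the loop invariant tying A's (memo, indexes) to B's lengths over the processed prefix of heights
def LoopInv (preH ls memo idxs : List Int) : Prop :=
  ls.length = preH.length ∧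
  idxs = ls.map (fun v => v - 1) ∧
  1 ≤ memo.length ∧
  (∀ i j (hi : i < memo.length) (hj : j < memo.length), i < j → memo[i] < memo[j]) ∧
  (∀ v ∈ ls, 1 ≤ v ∧ v ≤ (memo.length : Int)) ∧
  (∀ k (hk : k < memo.length),
     (∃ gl ∈ preH.zip ls, gl.2 = (k : Int) + 1 ∧ gl.1 = memo[k]) ∧
     (∀ gl ∈ preH.zip ls, gl.2 = (k : Int) + 1 → memo[k] ≤ gl.1))

theorem lowerBoundGo_spec (A : List Int) (K : Int)
    (hsort : ∀ i j (hi : i < A.length) (hj : j < A.length), i < j → A[i] < A[j]) :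
    ∀ fuel (x y : Int), (y - x).toNat ≤ fuel → 0 ≤ x → x ≤ y → y ≤ (A.length : Int) →
    (∀ i (hi : i < A.length), (i : Int) < x → A[i] < K) →
    (∀ i (hi : i < A.length), y ≤ (i : Int) → K ≤ A[i]) →
    0 ≤ lowerBoundGo A K x y ∧ lowerBoundGo A K x y ≤ (A.length : Int) ∧
    (∀ i (hi : i < A.length), (i : Int) < lowerBoundGo A K x y → A[i] < K) ∧
    (∀ i (hi : i < A.length), lowerBoundGo A K x y ≤ (i : Int) → K ≤ A[i]) := by
  intro fuel
  induction fuel with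
  | zero =>
    intro x y hfuel hx hxy hy hlo hhi
    have hxy' : ¬ x < y := by omega
    rw [lowerBoundGo, dif_neg hxy']
    refine ⟨hx, by omega, hlo, fun i hi h => hhi i hi (by omega)⟩
  | succ n ih =>
    intro x y hfuel hx hxy hy hlo hhi
    by_cases hxy' : x < y
    · have h1 := PySem.Int.floordiv_mul_add_mod (x + y) 2
      have h2 := PySem.Int.mod_nonneg (x + y) (by omega : (0:Int) < 2)
      have h3 := PySem.Int.mod_lt (x + y) (by omega : (0:Int) < 2)
      set mid := PySem.Int.floordiv (x + y) 2 with hmid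
      have hmlo : x ≤ mid := by omega
      have hmhi : mid < y := by omega
      have hmlt : mid.toNat < A.length := by omega
      have hget : PySem.List.pyGet? A mid = some A[mid.toNat] :=
        PySem.List.pyGet?_eq_some_getElem (xs := A) (i := mid) (by omega) (by omega)
      rw [lowerBoundGo, dif_pos hxy']
      simp only [← hmid, hget]
      by_cases hK : A[mid.toNat] ≥ K
      · rw [if_pos hK]
        refine ih x mid (by omega) hx (by omega) (by omega) hlo ?_
        intro i hi hmi
        rcases Nat.lt_or_ge mid.toNat i with hlt | hge
        · exact le_trans hK (le_of_lt (hsort mid.toNat i hmlt hi hlt))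
        · have : i = mid.toNat := by omega
          subst this; exact hK
      · rw [if_neg hK]
        refine ih (mid + 1) y (by omega) (by omega) (by omega) hy ?_ hhi
        intro i hi hmi
        rcases Nat.lt_or_ge i mid.toNat with hlt | hge
        · exact lt_of_lt_of_le (hsort i mid.toNat hi hmlt hlt) (by omega)
        · have : i = mid.toNat := by omega
          subst this; omega
    · rw [lowerBoundGo, dif_neg hxy']
      refine ⟨hx, by omega, hlo, fun i hi h => hhi i hi (by omega)⟩

theorem bestFold_spec (h : Int) :
    ∀ (l : List (Int × Int)) (b0 : Int),
    b0 ≤ l.foldl (fun b gl => if gl.1 < h ∧ b < gl.2 then gl.2 else b) b0 ∧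
    (l.foldl (fun b gl => if gl.1 < h ∧ b < gl.2 then gl.2 else b) b0 = b0 ∨
      ∃ gl ∈ l, gl.1 < h ∧ gl.2 = l.foldl (fun b gl => if gl.1 < h ∧ b < gl.2 then gl.2 else b) b0) ∧
    (∀ gl ∈ l, gl.1 < h → gl.2 ≤ l.foldl (fun b gl => if gl.1 < h ∧ b < gl.2 then gl.2 else b) b0) := by
  intro l
  induction l with
  | nil => intro b0; simp
  | cons gl t ih =>
    intro b0
    simp only [List.foldl_cons]
    by_cases hc : gl.1 < h ∧ b0 < gl.2
    · rw [if_pos hc]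
      obtain ⟨h1, h2, h3⟩ := ih gl.2
      refine ⟨by omega, ?_, ?_⟩
      · rcases h2 with h2 | ⟨gl', hm, hp, he⟩
        · exact Or.inr ⟨gl, by simp, hc.1, h2.symm⟩
        · exact Or.inr ⟨gl', by simp [hm], hp, he⟩
      · intro gl' hm hp
        rcases List.mem_cons.mp hm with rfl | hm'
        · exact h1
        · exact h3 gl' hm' hp
    · rw [if_neg hc]
      obtain ⟨h1, h2, h3⟩ := ih b0
      refine ⟨h1, ?_, ?_⟩
      · rcases h2 with h2 | ⟨gl', hm, hp, he⟩
        · exact Or.inl h2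
        · exact Or.inr ⟨gl', by simp [hm], hp, he⟩
      · intro gl' hm hp
        rcases List.mem_cons.mp hm with rfl | hm'
        · rcases Decidable.em (b0 < gl'.2) with hb | hb
          · exact absurd ⟨hp, hb⟩ hc
          · omega
        · exact h3 gl' hm' hp

theorem inv_step (hs preH rest ls memo idxs : List Int) (h : Int)
    (hsplit : hs = preH ++ h :: rest) (hinv : LoopInv preH ls memo idxs) :
    LoopInv (preH ++ [h]) (stepB hs ls h) (stepA (memo, idxs) h).1 (stepA (memo, idxs) h).2 := by
  obtain ⟨h1, h2, h3, h4, h5, h6⟩ := hinv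
  have hne : memo ≠ [] := by intro hc; rw [hc] at h3; simp at h3
  set n := memo.length with hn
  -- hs.zip ls only sees the processed prefix
  have hzip : hs.zip ls = preH.zip ls := by
    conv_lhs => rw [hsplit, ← List.append_nil ls]
    rw [List.zip_append h1.symm]
    simp
  -- the new zip is the old one plus the new pair
  have hzip' : ∀ v : Int, (preH ++ [h]).zip (ls ++ [v]) = preH.zip ls ++ [(h, v)] := by
    intro v; rw [List.zip_append h1.symm]; rfl
  obtain ⟨hb0, hbw, hbmax⟩ := bestFold_spec h (preH.zip ls) 0
  set best := (preH.zip ls).foldl (fun b gl => if gl.1 < h ∧ b < gl.2 then gl.2 else b) 0 with hbdef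
  -- F1: best ≤ n
  have hF1 : best ≤ (n : Int) := by
    rcases hbw with hb | ⟨gl, hm, _, he⟩
    · omega
    · exact he ▸ (h5 gl.2 (List.of_mem_zip hm).2).2
  -- F2: if best < n then h ≤ memo[best]
  have hF2 : ∀ (hlt : best.toNat < n), h ≤ memo[best.toNat] := by
    intro hlt
    by_contra hcon
    obtain ⟨⟨gl, hm, hp, he⟩, _⟩ := h6 best.toNat hlt
    have := hbmax gl hm (by omega)
    omega
  -- F3: if 0 < best then memo[best-1] < h
  have hF3 : ∀ (hpos : 0 < best), memo[best.toNat - 1]'(by omega) < h := by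
    intro hpos
    rcases hbw with hb | ⟨gl, hm, hlth, he⟩
    · omega
    · obtain ⟨_, hmin⟩ := h6 (best.toNat - 1) (by omega)
      have := hmin gl hm (by omega)
      omega
  have hlast : PySem.List.pyGetD memo (-1) 0 = memo[n - 1]'(by omega) := by
    rw [PySem.List.pyGetD_neg_one memo 0 hne, List.getLast_eq_getElem]
  have hmono : ∀ i (hi : i < n), memo[i] ≤ memo[n - 1]'(by omega) := by
    intro i hi
    rcases Nat.lt_or_ge i (n - 1) with hlt | hge
    · exact le_of_lt (h4 i (n-1) hi (by omega) hlt)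
    · have : i = n - 1 := by omega
      subst this; exact le_refl _
  by_cases hlt : PySem.List.pyGetD memo (-1) 0 < h
  · -- append branch; best = n
    have hbn : best = (n : Int) := by
      by_contra hcon
      have hbln : best.toNat < n := by omega
      have := hF2 hbln
      have := hmono best.toNat hbln
      rw [hlast] at hlt
      omega
    have hAe : stepA (memo, idxs) h = (memo ++ [h], idxs ++ [(n : Int)]) := by
      simp only [stepA, if_pos hlt]; rw [← hn]
    have hBe : stepB hs ls h = ls ++ [(n : Int) + 1] := by
      simp only [stepB, hzip, ← hbdef, hbn]
    rw [hAe, hBe]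
    have hallm : ∀ i (hi : i < n), memo[i] < h := by
      intro i hi
      have := hmono i hi
      rw [hlast] at hlt
      omega
    refine ⟨by simp [h1], by simp [h2], by simp, ?_, ?_, ?_⟩
    · intro i j hi hj hij
      simp only [List.length_append, List.length_cons, List.length_nil] at hi hj
      rcases Nat.lt_or_ge j n with hjn | hjn
      · rw [List.getElem_append_left (by omega), List.getElem_append_left hjn]
        exact h4 i j (by omega) hjn hij
      · have hj' : j = n := by omega
        subst hj'
        rw [List.getElem_append_left (by omega)]
        have : (memo ++ [h])[n] = h := by simp [hn]
        rw [this]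
        exact hallm i (by omega)
    · intro v hv
      simp only [List.length_append, List.length_cons, List.length_nil]
      rcases List.mem_append.mp hv with hv | hv
      · have := h5 v hv; push_cast; omega
      · simp at hv; subst hv; push_cast; omega
    · intro k hk
      simp only [List.length_append, List.length_cons, List.length_nil] at hk
      rw [hzip']
      rcases Nat.lt_or_ge k n with hkn | hkn
      · have hkg : (memo ++ [h])[k]'(by simp; omega) = memo[k] := List.getElem_append_left hkn
        obtain ⟨⟨gl, hm, hp, he⟩, hmin⟩ := h6 k hkn
        refine ⟨⟨gl, List.mem_append_left _ hm, hp, by rw [hkg]; exact he⟩, ?_⟩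
        intro gl' hm' hp'
        rcases List.mem_append.mp hm' with hm' | hm'
        · rw [hkg]; exact hmin gl' hm' hp'
        · simp at hm'
          rw [hm'] at hp'
          simp at hp'
          omega
      · have hk' : k = n := by omega
        subst hk'
        have hkg : (memo ++ [h])[n]'(by simp [hn]) = h := by simp [hn]
        refine ⟨⟨(h, (n : Int) + 1), List.mem_append_right _ (by simp), by push_cast; ring, by rw [hkg]⟩, ?_⟩
        intro gl' hm' hp'
        rcases List.mem_append.mp hm' with hm' | hm'
        · have := (h5 gl'.2 (List.of_mem_zip hm').2).2
          omega
        · simp at hm'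
          rw [hkg]; simp [hm']
  · -- replace branch
    have hble : h ≤ memo[n - 1]'(by omega) := by rw [hlast] at hlt; omega
    have hbln : best.toNat < n := by
      by_contra hcon
      have hbn : best = (n : Int) := by omega
      have h9 := hF3 (by omega)
      have h10 : memo[n - 1]'(by omega) < h := by
        convert h9 using 2
        omega
      omega
    set c := best.toNat with hcdef
    have hbc : best = (c : Int) := by omega
    have hc2 : h ≤ memo[c] := hF2 hbln
    -- lower_bound memo h = best
    have hlb : lower_bound memo h = best := by
      obtain ⟨hr0, hr1, hr2, hr3⟩ := lowerBoundGo_spec memo h h4 memo.length 0 (memo.length : Int)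
        (by omega) (by omega) (by omega) (by omega) (by omega) (by omega)
      set r := lowerBoundGo memo h 0 (memo.length : Int) with hrdef
      have hrb : r ≤ best := by
        by_contra hcon
        exact absurd (hr2 c hbln (by omega)) (not_lt.mpr hc2)
      have hbr : best ≤ r := by
        by_contra hcon
        have hcpos : 0 < best := by omega
        exact absurd (hF3 hcpos) (not_lt.mpr (hr3 (c - 1) (by omega) (by omega)))
      have : r = best := by omega
      rw [lower_bound, ← hrdef, this]
    have hAe : stepA (memo, idxs) h = (memo.set c h, idxs ++ [best]) := by
      simp only [stepA, if_neg hlt, hlb]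
      rw [PySem.List.pySetD_of_nonneg memo (i := best) h (by omega), hbc]
      simp
    have hBe : stepB hs ls h = ls ++ [best + 1] := by
      simp only [stepB, hzip, ← hbdef]
    rw [hAe, hBe]
    have hget : ∀ i (hi : i < n), (memo.set c h)[i]'(by simpa using hi) =
        if c = i then h else memo[i] := by
      intro i hi; simp [List.getElem_set]
    refine ⟨by simp [h1], by simp [h2], by simp; omega, ?_, ?_, ?_⟩
    · intro i j hi hj hij
      simp only [List.length_set] at hi hj
      rw [hget i (by omega), hget j (by omega)]
      by_cases hic : c = i
      · subst hic
        rw [if_pos rfl, if_neg (show ¬ c = j by omega)]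
        exact lt_of_le_of_lt hc2 (h4 c j (by omega) (by omega) hij)
      · rw [if_neg hic]
        by_cases hjc : c = j
        · subst hjc
          rw [if_pos rfl]
          have hile : memo[i]'(by omega) ≤ memo[c - 1]'(by omega) := by
            rcases Nat.lt_or_ge i (c - 1) with hl | hg
            · exact le_of_lt (h4 i (c-1) (by omega) (by omega) hl)
            · have : i = c - 1 := by omega
              subst this; exact le_refl _
          exact lt_of_le_of_lt hile (hF3 (by omega))
        · rw [if_neg hjc]
          exact h4 i j (by omega) (by omega) hij
    · intro v hv
      simp only [List.length_set]
      rcases List.mem_append.mp hv with hv | hv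
      · exact h5 v hv
      · simp at hv; subst hv
        constructor <;> omega
    · intro k hk
      simp only [List.length_set] at hk
      rw [hzip']
      rw [hget k hk]
      by_cases hkc : c = k
      · subst hkc
        rw [if_pos rfl]
        obtain ⟨_, hmin⟩ := h6 c hk
        refine ⟨⟨(h, best + 1), List.mem_append_right _ (by simp), by omega, rfl⟩, ?_⟩
        intro gl' hm' hp'
        rcases List.mem_append.mp hm' with hm' | hm'
        · have := hmin gl' hm' hp'
          omega
        · simp at hm'
          simp [hm']
      · rw [if_neg hkc]
        obtain ⟨⟨gl, hm, hp, he⟩, hmin⟩ := h6 k hk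
        refine ⟨⟨gl, List.mem_append_left _ hm, hp, he⟩, ?_⟩
        intro gl' hm' hp'
        rcases List.mem_append.mp hm' with hm' | hm'
        · exact hmin gl' hm' hp'
        · simp at hm'
          rw [hm'] at hp'
          simp at hp'
          omega

theorem main_loop (hs : List Int) :
    ∀ (rest preH ls memo idxs : List Int), hs = preH ++ rest → LoopInv preH ls memo idxs →
    LoopInv hs (rest.foldl (stepB hs) ls)
      (rest.foldl stepA (memo, idxs)).1 (rest.foldl stepA (memo, idxs)).2 := by
  intro rest
  induction rest with
  | nil => intro preH ls memo idxs hsplit hinv; simpa [hsplit] using hinv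
  | cons h t ih =>
    intro preH ls memo idxs hsplit hinv
    have h2 := inv_step hs preH t ls memo idxs h hsplit hinv
    have := ih (preH ++ [h]) (stepB hs ls h)
      (stepA (memo, idxs) h).1 (stepA (memo, idxs) h).2 (by simp [hsplit]) h2
    simpa using this

theorem recon (P : List (Int × Int)) (hnd : (P.map (fun p => p.1)).Nodup)
    (lens idxs : List Int) (hidx : idxs = lens.map (fun v => v - 1))
    (hlen : lens.length = P.length) :
    ∀ (L : List Int), (∀ x ∈ L, 0 ≤ x ∧ x < (P.length : Int)) → L.Nodup →
    ∀ (S K : List Int) (off : Int),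
    S = (P.map (fun p => p.1)).filter (fun a => !(PySem.Set.contains K a)) →
    (∀ x ∈ L, (P.map (fun p => p.1)).getD x.toNat 0 ∉ K) →
    (L.foldl (stepRA idxs P) (S, off)).1 =
      (P.map (fun p => p.1)).filter
        (fun a => !(PySem.Set.contains (L.foldl (stepRB lens P) (K, off)).1 a)) ∧
    (L.foldl (stepRA idxs P) (S, off)).2 = (L.foldl (stepRB lens P) (K, off)).2 := by
  subst hidx
  intro L
  induction L with
  | nil => intro _ _ S K off hS _; exact ⟨hS, rfl⟩
  | cons x t ih =>
    intro hrange hnodL S K off hS hKfree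
    obtain ⟨hx0, hxlt⟩ := hrange x (by simp)
    have hxN : x.toNat < P.length := by omega
    have hxlens : x.toNat < lens.length := by omega
    have hBv : PySem.List.pyGetD lens x 0 = lens[x.toNat] :=
      PySem.List.pyGetD_eq_getElem lens 0 hx0 (by omega)
    have hAv : PySem.List.pyGetD (lens.map (fun v => v - 1)) x 0 = lens[x.toNat] - 1 := by
      rw [PySem.List.pyGetD_eq_getElem (lens.map (fun v => v - 1)) 0 hx0 (by simp; omega)]
      simp
    have hav : (PySem.List.pyGetD P x (0, 0)).1 =
        (P.map (fun p => p.1))[x.toNat]'(by simpa using hxN) := by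
      rw [PySem.List.pyGetD_eq_getElem P (0, 0) hx0 (by omega)]
      simp
    simp only [List.foldl_cons]
    by_cases hoff : off < 0
    · have hra : stepRA (lens.map (fun v => v - 1)) P (S, off) x = (S, off) := by
        simp only [stepRA, if_pos hoff]
      have hrb : stepRB lens P (K, off) x = (K, off) := by
        simp only [stepRB]
        rw [if_neg (by rintro ⟨hc, _⟩; omega)]
      rw [hra, hrb]
      exact ih (fun y hy => hrange y (by simp [hy])) (List.Nodup.of_cons hnodL) S K off hS
        (fun y hy => hKfree y (by simp [hy]))
    · by_cases hcond : lens[x.toNat] - 1 = off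
      · set a := (P.map (fun p => p.1))[x.toNat]'(by simpa using hxN) with hadef
        have haF : a ∈ P.map (fun p => p.1) := List.getElem_mem _
        have haK : a ∉ K := by
          have := hKfree x (by simp)
          rwa [List.getD_eq_getElem _ _ (by simpa using hxN)] at this
        have haS : a ∈ S := by
          rw [hS, List.mem_filter]
          exact ⟨haF, by simp [PySem.Set.contains_eq_listContains]; exact haK⟩
        have hra : stepRA (lens.map (fun v => v - 1)) P (S, off) x = (PySem.Set.discard S a, off - 1) := by
          simp only [stepRA, if_neg hoff]
          rw [hAv, if_pos hcond, hav]
          rw [PySem.Set.remove?_of_mem haS]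
          rfl
        have hrb : stepRB lens P (K, off) x = (K ++ [a], off - 1) := by
          simp only [stepRB]
          rw [hBv, if_pos ⟨by omega, hcond⟩, hav]
          rw [PySem.Set.add_of_not_mem haK]
        rw [hra, hrb]
        refine ih (fun y hy => hrange y (by simp [hy])) (List.Nodup.of_cons hnodL)
          (PySem.Set.discard S a) (K ++ [a]) (off - 1) ?_ ?_
        · rw [hS, PySem.Set.discard, List.filter_filter]
          apply List.filter_congr
          intro b _
          simp [PySem.Set.contains_eq_listContains, Bool.not_or, Bool.and_comm, beq_eq_decide]
        · intro y hy
          have hyr := hrange y (by simp [hy])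
          have hyK := hKfree y (by simp [hy])
          rw [List.getD_eq_getElem _ _ (by simp; omega)] at hyK ⊢
          simp only [List.mem_append, List.mem_singleton]
          rintro (hc | hc)
          · exact hyK hc
          · have hyx : y ≠ x := by
              intro hcc; subst hcc
              exact (List.nodup_cons.mp hnodL).1 hy
            have : y.toNat ≠ x.toNat := by omega
            rw [hadef] at hc
            exact this (List.Nodup.getElem_inj_iff hnd |>.mp hc)
      · have hra : stepRA (lens.map (fun v => v - 1)) P (S, off) x = (S, off) := by
          simp only [stepRA, if_neg hoff]
          rw [hAv, if_neg hcond]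
        have hrb : stepRB lens P (K, off) x = (K, off) := by
          simp only [stepRB]
          rw [hBv, if_neg (by rintro ⟨_, hc⟩; exact hcond hc)]
        rw [hra, hrb]
        exact ih (fun y hy => hrange y (by simp [hy])) (List.Nodup.of_cons hnodL) S K off hS
          (fun y hy => hKfree y (by simp [hy]))

theorem innerB_eq (W : List (Int × Int)) (ls : List Int) (a h : Int)
    (h0 : 0 ≤ a) (hls : ls.length = a.toNat) (hx : a.toNat < W.length)
    (hh : (PySem.List.pyGetD W a (0, 0)).2 = h) :
    innerB W ls a =
      ((W.map (fun p => p.2)).zip ls).foldl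
        (fun b gl => if gl.1 < h ∧ b < gl.2 then gl.2 else b) 0 := by
  unfold innerB
  set zs := (W.map (fun p => p.2)).zip ls with hzs
  have hzlen : zs.length = a.toNat := by
    rw [hzs, List.length_zip]
    simp [hls]
    omega
  rw [PySem.List.foldl_congr_mem (PySem.List.pyRange 0 a 1) _
      (fun b j =>
        if (PySem.List.pyGetD zs j ((0 : Int), (0 : Int))).1 < h ∧
            b < (PySem.List.pyGetD zs j ((0 : Int), (0 : Int))).2
        then (PySem.List.pyGetD zs j ((0 : Int), (0 : Int))).2 else b) 0
      (fun b j hj => by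
        dsimp only
        rw [PySem.List.mem_pyRange_one] at hj
        have hj' : j.toNat < a.toNat := by omega
        rw [hh,
          PySem.List.pyGetD_eq_getElem W (0, 0) hj.1 (by omega),
          PySem.List.pyGetD_eq_getElem ls 0 hj.1 (by omega),
          PySem.List.pyGetD_eq_getElem zs (0, 0) hj.1 (by omega)]
        simp [hzs, List.getElem_zip])]
  rw [show a = (zs.length : Int) by omega]
  rw [PySem.List.foldl_pyRange_zero_pyGetD' zs (0, 0)
    (fun b gl => if gl.1 < h ∧ b < gl.2 then gl.2 else b) 0]

theorem outerB (W : List (Int × Int)) :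
    ∀ (rest : List Int) (a : Int) (ls : List Int), 0 ≤ a → a ≤ (W.length : Int) →
    rest = (W.map (fun p => p.2)).drop a.toNat → ls.length = a.toNat →
    (PySem.List.pyRange a (W.length : Int) 1).foldl (stepAltB W) ls =
      rest.foldl (stepB (W.map (fun p => p.2))) ls := by
  intro rest
  induction rest with
  | nil =>
    intro a ls ha0 haW hrest hls
    have h1 := congrArg List.length hrest
    simp only [List.length_nil, List.length_drop, List.length_map] at h1
    rw [PySem.List.pyRange_one_eq_nil (by omega)]
    simp
  | cons h t ih =>
    intro a ls ha0 haW hrest hls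
    have hlen : a.toNat < (W.map (fun p => p.2)).length := by
      by_contra hc
      rw [List.drop_eq_nil_iff.mpr (by omega)] at hrest
      simp at hrest
    have haW' : a < (W.length : Int) := by simp at hlen; omega
    have hcons : h :: t = (W.map (fun p => p.2))[a.toNat] ::
        (W.map (fun p => p.2)).drop (a.toNat + 1) := by
      rw [← List.drop_eq_getElem_cons hlen, ← hrest]
    have hh : h = (W.map (fun p => p.2))[a.toNat] := by
      injection hcons
    have ht : t = (W.map (fun p => p.2)).drop (a.toNat + 1) := by
      injection hcons with _ h2
    rw [PySem.List.pyRange_one_cons haW', List.foldl_cons]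
    have hstep : stepAltB W ls a = stepB (W.map (fun p => p.2)) ls h := by
      simp only [stepAltB, stepB]
      rw [innerB_eq W ls a h ha0 hls (by simpa using hlen)
        (by rw [PySem.List.pyGetD_eq_getElem W (0, 0) ha0 (by omega), hh]; simp)]
    rw [hstep]
    exact ih (a + 1) _ (by omega) (by omega) (by rw [ht]; congr 1; omega)
      (by simp [stepB, hls]; omega)

-- ===== VERDICT (by name: the statement is the Claim_ definition above) =====
theorem solve_spec : Claim_equal_solve := by
  intro N P hdom hpre
  obtain ⟨hPne, hNle, hnd⟩ := hpre
  unfold Spec_solve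
  have hlen1 : 1 ≤ P.length := List.length_pos_iff.mpr hPne
  by_cases hN0 : 0 < N
  case neg =>
    -- N ≤ 0: A returns (N - 1, []) from its unconditional P[0] seed; B's DP table is its
    -- seed [1] and no wire is considered, so it returns (N - 1, []) too
    obtain ⟨p0, Pt, rfl⟩ : ∃ p0 Pt, P = p0 :: Pt := by
      cases P with
      | nil => exact absurd rfl hPne
      | cons a t => exact ⟨a, t, rfl⟩
    have hr1 : PySem.List.pyRange 1 N 1 = [] := PySem.List.pyRange_one_eq_nil (by omega)
    have hr0 : PySem.List.pyRange 0 N 1 = [] := PySem.List.pyRange_one_eq_nil (by omega)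
    have hr2 : PySem.List.pyRange (N - 1) (-1) (-1) = [] :=
      PySem.List.pyRange_neg_one_eq_nil (by omega)
    have hmax : PySem.List.max? [(1 : Int)] (fun l => l) = some 1 := by decide
    simp only [solve, solve_alt, PySem.List.pyGet?_zero_cons, hr0, hr1, hr2, List.foldl_nil,
      List.map_nil, List.filter_nil, hmax]
    simp [PySem.Set.ofList, PySem.List.sorted]
  have hWlen' : (P.take N.toNat).length = N.toNat := by simp; omega
  have hWlenI : ((P.take N.toNat).length : Int) = N := by rw [hWlen']; omega
  -- both programs only ever read the first N wires
  have hPW : ∀ x : Int, 0 ≤ x → x < N →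
      PySem.List.pyGetD P x ((0 : Int), (0 : Int)) = PySem.List.pyGetD (P.take N.toNat) x (0, 0) := by
    intro x hx0 hxN
    rw [PySem.List.pyGetD_eq_getElem P (0, 0) hx0 (by omega),
      PySem.List.pyGetD_eq_getElem (P.take N.toNat) (0, 0) hx0 (by rw [hWlenI]; omega)]
    exact List.getElem_take.symm
  obtain ⟨w0, Wt, hW⟩ : ∃ w0 Wt, P.take N.toNat = w0 :: Wt := by
    cases hc : P.take N.toNat with
    | nil => rw [hc] at hWlen'; simp at hWlen'; omega
    | cons a t => exact ⟨a, t, rfl⟩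
  have hP0 : PySem.List.pyGet? P 0 = some w0 := by
    rw [PySem.List.pyGet?_eq_some_getElem (xs := P) (i := 0) (by omega) (by omega)]
    congr 1
    have h0 : (P.take N.toNat)[0]'(by rw [hW]; simp) = P[(0 : Nat)]'(by omega) :=
      List.getElem_take
    have h1 : (List.take N.toNat P)[0]'(by rw [hW]; simp) = w0 := by simp [hW]
    rw [h1] at h0
    simpa using h0.symm
  simp only [solve, solve_alt, hP0]
  -- replace every access to P by the corresponding access to the first N wires
  rw [List.map_congr_left (l := PySem.List.pyRange 0 N 1)
      (g := fun x => (PySem.List.pyGetD (P.take N.toNat) x (0, 0)).1)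
      (fun x hx => by
        rw [PySem.List.mem_pyRange_one] at hx
        rw [hPW x hx.1 hx.2])]
  rw [PySem.List.foldl_congr_mem (PySem.List.pyRange 1 N 1) _
      (fun st x => stepA st ((PySem.List.pyGetD (P.take N.toNat) x (0, 0)).2)) ([w0.2], [0])
      (fun acc x hx => by
        rw [PySem.List.mem_pyRange_one] at hx
        rw [hPW x (by omega) hx.2])]
  rw [PySem.List.foldl_congr_mem (PySem.List.pyRange (N - 1) (-1) (-1))
      (stepRA (List.foldl (fun st x => stepA st ((PySem.List.pyGetD (P.take N.toNat) x (0, 0)).2))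
        ([w0.2], [0]) (PySem.List.pyRange 1 N 1)).2 P)
      (stepRA (List.foldl (fun st x => stepA st ((PySem.List.pyGetD (P.take N.toNat) x (0, 0)).2))
        ([w0.2], [0]) (PySem.List.pyRange 1 N 1)).2 (P.take N.toNat)) _
      (fun acc x hx => by
        rw [PySem.List.mem_pyRange_neg_one] at hx
        simp only [stepRA, hPW x (by omega) (by omega)])]
  rw [PySem.List.foldl_congr_mem (PySem.List.pyRange 1 N 1)
      (stepAltB P) (stepAltB (P.take N.toNat)) [1]
      (fun acc x hx => by
        rw [PySem.List.mem_pyRange_one] at hx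
        have hin : innerB P acc x = innerB (P.take N.toNat) acc x := by
          unfold innerB
          rw [hPW x (by omega) hx.2]
          exact PySem.List.foldl_congr_mem _ _ _ _ (fun b j hj => by
            rw [PySem.List.mem_pyRange_one] at hj
            rw [hPW j hj.1 (by omega)])
        simp only [stepAltB, hin])]
  rw [hW] at hnd hWlenI hPW ⊢
  rw [← hWlenI]
  rw [PySem.List.foldl_pyRange_pyGetD' (w0 :: Wt) (0, 0) (fun st p => stepA st p.2) ([w0.2], [0])
    (by omega : (0:Int) ≤ 1)]
  simp only [Int.toNat_one, List.drop_succ_cons, List.drop_zero]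
  rw [show List.foldl (fun (st : List Int × List Int) (p : Int × Int) => stepA st p.2)
        ([w0.2], [0]) Wt =
      List.foldl stepA ([w0.2], [0]) (Wt.map (fun p => p.2)) from (List.foldl_map).symm]
  -- both sides' lists of first coordinates
  have hmapW : List.map (fun x => (PySem.List.pyGetD (w0 :: Wt) x (0, 0)).1)
        (PySem.List.pyRange 0 ((w0 :: Wt).length : Int)) =
      List.map (fun p => p.1) (w0 :: Wt) := by
    rw [show (fun x => (PySem.List.pyGetD (w0 :: Wt) x ((0 : Int), (0 : Int))).1) =
        ((fun p : Int × Int => p.1) ∘ (fun x : Int => PySem.List.pyGetD (w0 :: Wt) x (0, 0)))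
        from rfl]
    rw [← List.map_map, PySem.List.map_pyGetD_pyRange_zero']
  have hres : PySem.Set.ofList (List.map (fun p => p.1) (w0 :: Wt)) =
      List.map (fun p => p.1) (w0 :: Wt) :=
    PySem.Set.ofList_eq_self_of_nodup _ hnd
  rw [hmapW, hres]
  -- B's DP loop is the zip-based fold over the tail heights
  rw [outerB (w0 :: Wt) ((w0.2 :: List.map (fun p => p.2) Wt).drop 1) 1 [1] (by omega)
      (by simp) (by simp) (by simp)]
  rw [show List.map (fun p => p.2) (w0 :: Wt) = w0.2 :: List.map (fun p => p.2) Wt from rfl]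
  simp only [List.drop_succ_cons, List.drop_zero]
  -- joint loop invariant
  have inv0 : LoopInv [w0.2] [1] [w0.2] [0] := by
    refine ⟨rfl, by simp, by simp, ?_, ?_, ?_⟩
    · intro i j hi hj hij; simp at hi hj; omega
    · intro v hv; simp at hv; subst hv; simp
    · intro k hk
      simp at hk
      subst hk
      exact ⟨⟨(w0.2, 1), by simp [List.zip], by simp, rfl⟩,
        fun gl hm _ => by simp [List.zip] at hm; simp [hm]⟩
  have hMain := main_loop (w0.2 :: List.map (fun p => p.2) Wt) (List.map (fun p => p.2) Wt)
    [w0.2] [1] [w0.2] [0] (by simp) inv0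
  obtain ⟨i1, i2, i3, i4, i5, i6⟩ := hMain
  set stA := List.foldl stepA ([w0.2], [0]) (List.map (fun p => p.2) Wt) with hstA
  set lsF := List.foldl (stepB (w0.2 :: List.map (fun p => p.2) Wt)) [1]
    (List.map (fun p => p.2) Wt) with hlsF
  have hlsFlen : lsF.length = Wt.length + 1 := by
    rw [i1]; simp
  -- max(lengths) is the number of piles
  cases hm : PySem.List.max? lsF (fun a => a) with
  | none =>
    rw [PySem.List.max?_eq_none_iff] at hm
    rw [hm] at hlsFlen
    simp at hlsFlen
  | some m =>
    have hm1 : m ≤ (stA.1.length : Int) := (i5 m (PySem.List.max?_mem hm)).2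
    have hm2 : (stA.1.length : Int) ≤ m := by
      obtain ⟨⟨gl, hmem, hp, _⟩, _⟩ := i6 (stA.1.length - 1) (by omega)
      have h2 : gl.2 ∈ lsF := (List.of_mem_zip hmem).2
      have h3 := PySem.List.max?_isMax hm gl.2 h2
      have h4 : ((stA.1.length - 1 : Nat) : Int) = (stA.1.length : Int) - 1 := by omega
      rw [h4] at hp
      omega
    have hmEq : m = (stA.1.length : Int) := le_antisymm hm1 hm2
    -- B's kept-wire loop reads P only at indices below N
    dsimp only
    rw [PySem.List.foldl_congr_mem (PySem.List.pyRange (((w0 :: Wt).length : Int) - 1) (-1) (-1))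
        (stepRB lsF P) (stepRB lsF (w0 :: Wt)) (PySem.Set.empty, m - 1)
        (fun acc x hx => by
          rw [PySem.List.mem_pyRange_neg_one] at hx
          simp only [stepRB, hPW x (by omega) (by omega)])]
    have hrange : ∀ x ∈ PySem.List.pyRange (((w0 :: Wt).length : Int) - 1) (-1) (-1),
        0 ≤ x ∧ x < ((w0 :: Wt).length : Int) := by
      intro x hx
      rw [PySem.List.mem_pyRange_neg_one] at hx
      exact ⟨by omega, by omega⟩
    have hnodL : (PySem.List.pyRange (((w0 :: Wt).length : Int) - 1) (-1) (-1)).Nodup := by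
      rw [PySem.List.pyRange_neg_one_eq_reverse]
      exact List.nodup_reverse.mpr (PySem.List.nodup_pyRange_one _ _)
    have hrec := recon (w0 :: Wt) hnd lsF stA.2 i2 (by simp [hlsFlen])
      (PySem.List.pyRange (((w0 :: Wt).length : Int) - 1) (-1) (-1)) hrange hnodL
      (List.map (fun p => p.1) (w0 :: Wt)) PySem.Set.empty ((stA.1.length : Int) - 1)
      (by simp [PySem.Set.empty]) (by simp [PySem.Set.empty])
    simp only [PySem.Set.contains_eq_listContains] at hrec
    rw [hmEq, hrec.1]
    rfl
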